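-- pv_equiv track=rewrite | github.com/XyzHuy/-DL-Fine-tuning-coding-model | data/solution/Solution1950.py | findMaximums
-- ===== SOURCE A (Python) =====
-- from typing import List
--
-- def findMaximums(nums: List[int]) -> List[int]:
--     n = len(nums)
--     left = [-1] * n  # previous smaller element's index
--     right = [n] * n  # next smaller element's index
--
--     # Monotonic stack to find the previous smaller element
--     stack = []
--     for i in range(n):
--         while stack and nums[stack[-1]] >= nums[i]:
--             stack.pop()
--         if stack:
--             left[i] = stack[-1]
--         stack.append(i)
--
--     # Monotonic stack to find the next smaller element
--     stack = []
--     for i in range(n-1, -1, -1):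
--         while stack and nums[stack[-1]] >= nums[i]:
--             stack.pop()
--         if stack:
--             right[i] = stack[-1]
--         stack.append(i)
--
--     # Frequency array to count the maximum possible minimum values for each subarray length
--     freq = [0] * (n + 1)
--     for i in range(n):
--         length = right[i] - left[i] - 1
--         freq[length] = max(freq[length], nums[i])
--
--     # Fill the frequency array to ensure the maximum values are propagated correctly
--     for i in range(n - 1, 0, -1):
--         freq[i] = max(freq[i], freq[i + 1])
--
--     # Construct the result array
--     result = [0] * n
--     for i in range(n):
--         result[i] = freq[i + 1]
--
--     return result
-- ===== SOURCE B (Python) =====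
-- from typing import List
--
-- def findMaximums(nums: List[int]) -> List[int]:
--     n = len(nums)
--     # best[L] = highest value that is the minimum of some window of length L (0 if none recorded)
--     best = [0] * (n + 1)
--     for i in range(n):
--         v = nums[i]
--         l = i - 1
--         while l >= 0 and nums[l] >= v:
--             l -= 1
--         r = i + 1
--         while r < n and nums[r] >= v:
--             r += 1
--         length = r - l - 1
--         if v > best[length]:
--             best[length] = v
--     # build the answer back-to-front with a running maximum over lengths >= L
--     out = []
--     run = 0
--     for L in range(n, 0, -1):
--         if best[L] > run:
--             run = best[L]
--         out.append(run)
--     out.reverse()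
--     return out
-- ===== Notes on version B (the rewrite author's own statement) =====
-- stated objective: alternative
-- what changed: Replaces A's two monotonic-stack passes by a direct nearest-smaller scan to each side of every element, and replaces A's in-place downward freq propagation plus index-read pass by a single back-to-front collection with a running maximum.
import Mathlib
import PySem

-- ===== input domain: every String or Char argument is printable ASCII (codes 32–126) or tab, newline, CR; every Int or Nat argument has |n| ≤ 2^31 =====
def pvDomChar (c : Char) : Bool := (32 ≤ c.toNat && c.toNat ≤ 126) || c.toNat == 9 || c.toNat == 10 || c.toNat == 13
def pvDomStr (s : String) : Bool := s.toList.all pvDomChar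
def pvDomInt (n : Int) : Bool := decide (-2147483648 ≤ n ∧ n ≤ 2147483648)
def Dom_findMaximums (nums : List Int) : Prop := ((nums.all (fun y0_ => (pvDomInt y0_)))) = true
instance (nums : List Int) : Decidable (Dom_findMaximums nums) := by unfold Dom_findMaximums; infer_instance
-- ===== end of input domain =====

-- B replaces A's two monotonic-stack passes by direct nearest-smaller scans per element and
-- builds the answer back-to-front with a running maximum instead of A's in-place freq
-- propagation pass (objective: alternative, not faster).

-- ===== PORT A =====
-- `while stack and nums[stack[-1]] >= nums[i]: stack.pop()`  (stack head = Python's stack[-1])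
def pvPop (nums : List Int) (v : Int) : List Nat → List Nat
  | [] => []
  | j :: s => if v ≤ nums.getD j 0 then pvPop nums v s else j :: s

-- one iteration of either monotonic-stack loop: pop, record top (if any) at index i, push i
def pvStep (nums : List Int) (st : List Nat × List Int) (i : Nat) : List Nat × List Int :=
  let s := pvPop nums (nums.getD i 0) st.1
  match s with
  | [] => (i :: s, st.2)
  | j :: _ => (i :: s, st.2.set i (j : Int))

def findMaximums (nums : List Int) : List Int :=
  let n := nums.length
  -- previous-smaller pass
  let left := ((List.range n).foldl (pvStep nums) ([], List.replicate n (-1))).2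
  -- next-smaller pass (i from n-1 down to 0)
  let right := (((List.range n).reverse).foldl (pvStep nums) ([], List.replicate n (n : Int))).2
  -- freq[length] = max(freq[length], nums[i])
  let freq := (List.range n).foldl (fun freq i =>
      let len := ((right.getD i 0) - (left.getD i 0) - 1).toNat
      freq.set len (max (freq.getD len 0) (nums.getD i 0))) (List.replicate (n + 1) 0)
  -- freq[i] = max(freq[i], freq[i+1]) for i from n-1 down to 1
  let freq := ((List.range' 1 (n - 1)).reverse).foldl (fun freq i =>
      freq.set i (max (freq.getD i 0) (freq.getD (i + 1) 0))) freq
  -- result[i] = freq[i+1]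
  (List.range n).map (fun i => freq.getD (i + 1) 0)

-- ===== PORT B =====
-- `l = i-1; while l >= 0 and nums[l] >= v: l -= 1`  (argument is l+1, so 0 means l = -1)
def pvScanL (nums : List Int) (v : Int) : Nat → Int
  | 0 => -1
  | l + 1 => if v ≤ nums.getD l 0 then pvScanL nums v l else (l : Int)

-- `r = i+1; while r < n and nums[r] >= v: r += 1`
def pvScanR (nums : List Int) (v : Int) (r : Nat) : Int :=
  if r < nums.length then
    (if v ≤ nums.getD r 0 then pvScanR nums v (r + 1) else (r : Int))
  else (nums.length : Int)
termination_by nums.length - r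

def findMaximums_alt (nums : List Int) : List Int :=
  let n := nums.length
  let best := (List.range n).foldl (fun best i =>
      let v := nums.getD i 0
      let len := (pvScanR nums v (i + 1) - pvScanL nums v i - 1).toNat
      if best.getD len 0 < v then best.set len v else best) (List.replicate (n + 1) 0)
  -- running maximum over lengths n, n-1, ..., 1, collected back-to-front
  let out := (((List.range' 1 n).reverse).foldl (fun (st : List Int × Int) L =>
      let run := if st.2 < best.getD L 0 then best.getD L 0 else st.2
      (st.1 ++ [run], run)) ([], 0)).1
  out.reverse

-- ===== PRECONDITION & SPEC =====
def Spec_findMaximums (nums : List Int) (out : List Int) : Prop := out = findMaximums_alt nums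
instance (nums : List Int) (out : List Int) : Decidable (Spec_findMaximums nums out) := by unfold Spec_findMaximums; infer_instance

-- ===== CLAIM (what is proved, stated in full; the proofs are below) =====
def Claim_equal_findMaximums : Prop := ∀ (nums : List Int), Dom_findMaximums nums → Spec_findMaximums nums (findMaximums nums)

-- ===== LEMMAS AND PROOFS =====

-- popping while the top's value is ≥ v, on a stack whose values strictly decrease
-- along the list, is filtering by "< v"
theorem pvPop_eq_filter (nums : List Int) (v : Int) (s : List Nat)
    (h : s.Pairwise (fun a b => nums.getD b 0 < nums.getD a 0)) :
    pvPop nums v s = s.filter (fun j => decide (nums.getD j 0 < v)) := by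
  induction s with
  | nil => rfl
  | cons j t ih =>
    rcases List.pairwise_cons.mp h with ⟨hj, ht⟩
    simp only [pvPop, List.filter_cons]
    by_cases hv : v ≤ nums.getD j 0
    · rw [if_pos hv, if_neg (by simpa using (by omega : ¬ nums.getD j 0 < v)), ih ht]
    · rw [if_neg hv, if_pos (by simpa using (by omega : nums.getD j 0 < v))]
      have hall : ∀ b ∈ t, decide (nums.getD b 0 < v) = true := by
        intro b hb; have := hj b hb; simpa using (by omega : nums.getD b 0 < v)
      rw [List.filter_eq_self.mpr hall]

-- characterization of the left scan
theorem pvScanL_spec (nums : List Int) (v : Int) (i : Nat) :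
    (pvScanL nums v i = -1 ∧ ∀ l, l < i → v ≤ nums.getD l 0) ∨
    (∃ l0, l0 < i ∧ pvScanL nums v i = (l0 : Int) ∧ nums.getD l0 0 < v ∧
      ∀ k, l0 < k → k < i → v ≤ nums.getD k 0) := by
  induction i with
  | zero => left; exact ⟨rfl, by omega⟩
  | succ l ih =>
    have hstep : pvScanL nums v (l + 1) = if v ≤ nums.getD l 0 then pvScanL nums v l else (l : Int) := rfl
    by_cases hv : v ≤ nums.getD l 0
    · rw [hstep, if_pos hv] at *
      rcases ih with ⟨h1, h2⟩ | ⟨l0, h1, h2, h3, h4⟩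
      · left; refine ⟨h1, ?_⟩
        intro k hk; rcases Nat.lt_succ_iff_lt_or_eq.mp hk with h | h
        · exact h2 k h
        · subst h; exact hv
      · right; refine ⟨l0, by omega, h2, h3, ?_⟩
        intro k hk1 hk2; rcases Nat.lt_succ_iff_lt_or_eq.mp hk2 with h | h
        · exact h4 k hk1 h
        · subst h; exact hv
    · rw [hstep, if_neg hv]
      right; exact ⟨l, by omega, rfl, by omega, by omega⟩

-- characterization of the right scan
theorem pvScanR_spec (nums : List Int) (v : Int) (r : Nat) :
    (pvScanR nums v r = (nums.length : Int) ∧ ∀ k, r ≤ k → k < nums.length → v ≤ nums.getD k 0) ∨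
    (∃ r0, r ≤ r0 ∧ r0 < nums.length ∧ pvScanR nums v r = (r0 : Int) ∧ nums.getD r0 0 < v ∧
      ∀ k, r ≤ k → k < r0 → v ≤ nums.getD k 0) := by
  by_cases hr : r < nums.length
  · have hstep : pvScanR nums v r
        = if v ≤ nums.getD r 0 then pvScanR nums v (r + 1) else (r : Int) := by
      rw [pvScanR, if_pos hr]
    by_cases hv : v ≤ nums.getD r 0
    · rw [hstep, if_pos hv]
      rcases pvScanR_spec nums v (r + 1) with ⟨h1, h2⟩ | ⟨r0, h1, h2, h3, h4, h5⟩
      · left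
        refine ⟨h1, ?_⟩
        intro k hk1 hk2
        rcases Nat.eq_or_lt_of_le hk1 with h | h
        · subst h; exact hv
        · exact h2 k h hk2
      · right
        refine ⟨r0, by omega, h2, h3, h4, ?_⟩
        intro k hk1 hk2
        rcases Nat.eq_or_lt_of_le hk1 with h | h
        · subst h; exact hv
        · exact h5 k h hk2
    · rw [hstep, if_neg hv]
      right
      exact ⟨r, le_refl r, hr, rfl, by omega, by omega⟩
  · left
    refine ⟨?_, by omega⟩
    rw [pvScanR, if_neg hr]
termination_by nums.length - r

-- getD/set utilities specialized to our arrays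
theorem pv_getD_set_self (l : List Int) (i : Nat) (a : Int) (h : i < l.length) :
    (l.set i a).getD i 0 = a := by
  simp [List.getD, h]

theorem pv_getD_set_ne (l : List Int) (i j : Nat) (a : Int) (h : i ≠ j) :
    (l.set i a).getD j 0 = l.getD j 0 := by
  simp [List.getD, List.getElem?_set_ne h]

-- head of a filtered stack with strictly descending indices
theorem pv_filter_head_desc (p : Nat → Bool) (s : List Nat)
    (hpw : s.Pairwise (fun a b => b < a)) (l0 : Nat) (hmem : l0 ∈ s) (hp : p l0 = true)
    (hmax : ∀ j ∈ s, p j = true → j ≤ l0) : ∃ t, s.filter p = l0 :: t := by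
  induction s with
  | nil => simp at hmem
  | cons j t ih =>
    rcases List.pairwise_cons.mp hpw with ⟨hj, ht⟩
    by_cases hpj : p j = true
    · have hjl0 : j ≤ l0 := hmax j (List.mem_cons_self) hpj
      have : l0 = j := by
        rcases List.mem_cons.mp hmem with h | h
        · exact h
        · exact absurd (hj l0 h) (by omega)
      subst this
      exact ⟨t.filter p, by simp [hpj]⟩
    · have hl0t : l0 ∈ t := by
        rcases List.mem_cons.mp hmem with h | h
        · subst h; exact absurd hp (by simp [hpj])
        · exact h
      rcases ih ht hl0t (fun j hj hpj => hmax j (List.mem_cons_of_mem _ hj) hpj) with ⟨t', ht'⟩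
      exact ⟨t', by simp [hpj, ht']⟩

-- head of a filtered stack with strictly ascending indices
theorem pv_filter_head_asc (p : Nat → Bool) (s : List Nat)
    (hpw : s.Pairwise (fun a b => a < b)) (l0 : Nat) (hmem : l0 ∈ s) (hp : p l0 = true)
    (hmin : ∀ j ∈ s, p j = true → l0 ≤ j) : ∃ t, s.filter p = l0 :: t := by
  induction s with
  | nil => simp at hmem
  | cons j t ih =>
    rcases List.pairwise_cons.mp hpw with ⟨hj, ht⟩
    by_cases hpj : p j = true
    · have hjl0 : l0 ≤ j := hmin j (List.mem_cons_self) hpj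
      have : l0 = j := by
        rcases List.mem_cons.mp hmem with h | h
        · exact h
        · exact absurd (hj l0 h) (by omega)
      subst this
      exact ⟨t.filter p, by simp [hpj]⟩
    · have hl0t : l0 ∈ t := by
        rcases List.mem_cons.mp hmem with h | h
        · subst h; exact absurd hp (by simp [hpj])
        · exact h
      rcases ih ht hl0t (fun j hj hpj => hmin j (List.mem_cons_of_mem _ hj) hpj) with ⟨t', ht'⟩
      exact ⟨t', by simp [hpj, ht']⟩

-- invariant of A's previous-smaller pass
theorem pv_leftPass (nums : List Int) (n : Nat) :
    ∀ i, i ≤ n →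
    (((List.range i).foldl (pvStep nums) ([], List.replicate n (-1))).1.Pairwise
        (fun a b => b < a ∧ nums.getD b 0 < nums.getD a 0)) ∧
    (∀ j ∈ ((List.range i).foldl (pvStep nums) ([], List.replicate n (-1))).1,
        j < i ∧ ∀ k, j < k → k < i → nums.getD j 0 < nums.getD k 0) ∧
    (∀ j, j < i → (∀ k, j < k → k < i → nums.getD j 0 < nums.getD k 0) →
        j ∈ ((List.range i).foldl (pvStep nums) ([], List.replicate n (-1))).1) ∧
    ((List.range i).foldl (pvStep nums) ([], List.replicate n (-1))).2.length = n ∧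
    (∀ j, j < i →
        ((List.range i).foldl (pvStep nums) ([], List.replicate n (-1))).2.getD j 0
          = pvScanL nums (nums.getD j 0) j) ∧
    (∀ j, i ≤ j → j < n →
        ((List.range i).foldl (pvStep nums) ([], List.replicate n (-1))).2.getD j 0 = -1) := by
  intro i
  induction i with
  | zero =>
    intro _
    refine ⟨by simp, by simp, by omega, by simp, by omega, ?_⟩
    intro j _ hj; exact List.getD_replicate _ hj
  | succ i ih =>
    intro hi1
    rcases ih (by omega) with ⟨ha, hbm, hc, hd, he, hf⟩
    set F := (List.range i).foldl (pvStep nums) ([], List.replicate n (-1)) with hF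
    have hsplit : (List.range (i+1)).foldl (pvStep nums) ([], List.replicate n (-1))
        = pvStep nums F i := by
      rw [List.range_succ, List.foldl_append]; rfl
    set v := nums.getD i 0 with hv
    have hvalpw : F.1.Pairwise (fun a b => nums.getD b 0 < nums.getD a 0) :=
      ha.imp (fun h => h.2)
    have hidxpw : F.1.Pairwise (fun a b => b < a) := ha.imp (fun h => h.1)
    have hpop : pvPop nums v F.1 = F.1.filter (fun j => decide (nums.getD j 0 < v)) :=
      pvPop_eq_filter nums v F.1 hvalpw
    rcases pvScanL_spec nums v i with ⟨hm1, hall⟩ | ⟨l0, hl0i, hscan, hl0v, hmaxs⟩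
    · -- no previous smaller element: the whole stack pops
      have hnil : pvPop nums v F.1 = [] := by
        rw [hpop]
        apply List.filter_eq_nil_iff.mpr
        intro j hj
        have h1 := (hbm j hj).1
        have h2 := hall j h1
        simp only [decide_eq_true_eq]
        omega
      have hstep : pvStep nums F i = (i :: ([] : List Nat), F.2) := by
        unfold pvStep; rw [hnil]
      rw [hsplit, hstep]
      refine ⟨by simp, ?_, ?_, hd, ?_, ?_⟩
      · intro j hj
        simp at hj; subst hj
        exact ⟨by omega, by omega⟩
      · intro j hj hsurv
        rcases Nat.lt_succ_iff_lt_or_eq.mp hj with h | h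
        · exfalso
          have hjF : j ∈ F.1 := hc j h (fun k hk1 hk2 => hsurv k hk1 (by omega))
          have h1 := hall j h
          have h2 := hsurv i h (by omega)
          omega
        · simp [h]
      · intro j hj
        rcases Nat.lt_succ_iff_lt_or_eq.mp hj with h | h
        · exact he j h
        · subst h
          rw [hf j (le_refl j) (by omega), ← hv]
          exact hm1.symm
      · intro j hj1 hj2
        exact hf j (by omega) hj2
    · -- previous smaller element l0 exists
      have hl0F : l0 ∈ F.1 := by
        apply hc l0 hl0i
        intro k hk1 hk2
        have := hmaxs k hk1 hk2
        omega
      rcases pv_filter_head_desc (fun j => decide (nums.getD j 0 < v)) F.1 hidxpw l0 hl0F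
          (decide_eq_true hl0v)
          (by intro j hj hpj
              rw [decide_eq_true_eq] at hpj
              by_contra hgt
              have := hmaxs j (by omega) (hbm j hj).1
              omega) with ⟨t, hfilter⟩
      have hpop' : pvPop nums v F.1 = l0 :: t := by rw [hpop, hfilter]
      have hstep : pvStep nums F i = (i :: l0 :: t, F.2.set i (l0 : Int)) := by
        unfold pvStep; rw [hpop']
      rw [hsplit, hstep]
      have hsub : ∀ x ∈ l0 :: t, x ∈ F.1 ∧ nums.getD x 0 < v := by
        intro x hx
        rw [← hfilter] at hx
        rcases List.mem_filter.mp hx with ⟨h1, h2⟩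
        exact ⟨h1, of_decide_eq_true h2⟩
      refine ⟨?_, ?_, ?_, by simp [hd], ?_, ?_⟩
      · apply List.pairwise_cons.mpr
        constructor
        · intro b hb
          rcases hsub b hb with ⟨h1, h2⟩
          exact ⟨(hbm b h1).1, h2⟩
        · rw [← hfilter]; exact ha.filter _
      · intro j hj
        rcases List.mem_cons.mp hj with h | h
        · subst h; exact ⟨by omega, by omega⟩
        · rcases hsub j h with ⟨h1, h2⟩
          rcases hbm j h1 with ⟨h3, h4⟩
          refine ⟨by omega, ?_⟩
          intro k hk1 hk2
          rcases Nat.lt_succ_iff_lt_or_eq.mp hk2 with hk | hk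
          · exact h4 k hk1 hk
          · subst hk; exact h2
      · intro j hj hsurv
        rcases Nat.lt_succ_iff_lt_or_eq.mp hj with h | h
        · have hjF : j ∈ F.1 := hc j h (fun k hk1 hk2 => hsurv k hk1 (by omega))
          apply List.mem_cons_of_mem
          rw [← hfilter]
          apply List.mem_filter.mpr
          exact ⟨hjF, decide_eq_true (hsurv i h (by omega))⟩
        · simp [h]
      · intro j hj
        rcases Nat.lt_succ_iff_lt_or_eq.mp hj with h | h
        · rw [pv_getD_set_ne _ _ _ _ (by omega)]; exact he j h
        · subst h
          rw [pv_getD_set_self _ _ _ (by omega : j < F.2.length), ← hv, hscan]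
      · intro j hj1 hj2
        rw [pv_getD_set_ne _ _ _ _ (by omega)]
        exact hf j (by omega) hj2

-- invariant of A's next-smaller pass (processing indices n-1, n-2, ..., m)
theorem pv_rightPass (nums : List Int) :
    ∀ c m, m + c = nums.length →
    (((List.range' m c).reverse).foldl (pvStep nums)
        ([], List.replicate nums.length ((nums.length : Int)))).1.Pairwise
        (fun a b => a < b ∧ nums.getD b 0 < nums.getD a 0) ∧
    (∀ j ∈ (((List.range' m c).reverse).foldl (pvStep nums)
        ([], List.replicate nums.length ((nums.length : Int)))).1,
        m ≤ j ∧ j < nums.length ∧ ∀ k, m ≤ k → k < j → nums.getD j 0 < nums.getD k 0) ∧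
    (∀ j, m ≤ j → j < nums.length →
        (∀ k, m ≤ k → k < j → nums.getD j 0 < nums.getD k 0) →
        j ∈ (((List.range' m c).reverse).foldl (pvStep nums)
          ([], List.replicate nums.length ((nums.length : Int)))).1) ∧
    ((((List.range' m c).reverse).foldl (pvStep nums)
        ([], List.replicate nums.length ((nums.length : Int)))).2.length = nums.length) ∧
    (∀ j, m ≤ j → j < nums.length →
        (((List.range' m c).reverse).foldl (pvStep nums)
          ([], List.replicate nums.length ((nums.length : Int)))).2.getD j 0
          = pvScanR nums (nums.getD j 0) (j + 1)) ∧
    (∀ j, j < m →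
        (((List.range' m c).reverse).foldl (pvStep nums)
          ([], List.replicate nums.length ((nums.length : Int)))).2.getD j 0
          = (nums.length : Int)) := by
  intro c
  induction c with
  | zero =>
    intro m hm
    refine ⟨by simp, by simp, by omega, by simp, by omega, ?_⟩
    intro j hj
    exact List.getD_replicate _ (by omega)
  | succ c ih =>
    intro m hm
    rcases ih (m + 1) (by omega) with ⟨ha, hbm, hc, hd, he, hf⟩
    set G := ((List.range' (m + 1) c).reverse).foldl (pvStep nums)
        ([], List.replicate nums.length ((nums.length : Int))) with hG
    have hsplit : ((List.range' m (c + 1)).reverse).foldl (pvStep nums)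
        ([], List.replicate nums.length ((nums.length : Int))) = pvStep nums G m := by
      rw [List.range'_succ, List.reverse_cons, List.foldl_append]; rfl
    set v := nums.getD m 0 with hv
    have hvalpw : G.1.Pairwise (fun a b => nums.getD b 0 < nums.getD a 0) :=
      ha.imp (fun h => h.2)
    have hidxpw : G.1.Pairwise (fun a b => a < b) := ha.imp (fun h => h.1)
    have hpop : pvPop nums v G.1 = G.1.filter (fun j => decide (nums.getD j 0 < v)) :=
      pvPop_eq_filter nums v G.1 hvalpw
    rcases pvScanR_spec nums v (m + 1) with ⟨hn, hall⟩ | ⟨r0, h1, h2, h3, h4, h5⟩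
    · -- no next smaller element: the whole stack pops
      have hnil : pvPop nums v G.1 = [] := by
        rw [hpop]
        apply List.filter_eq_nil_iff.mpr
        intro j hj
        have hj1 := (hbm j hj).1
        have hj2 := (hbm j hj).2.1
        have := hall j hj1 hj2
        simp only [decide_eq_true_eq]
        omega
      have hstep : pvStep nums G m = (m :: ([] : List Nat), G.2) := by
        unfold pvStep; rw [hnil]
      rw [hsplit, hstep]
      refine ⟨by simp, ?_, ?_, hd, ?_, ?_⟩
      · intro j hj
        simp at hj; subst hj
        exact ⟨le_refl j, by omega, by omega⟩
      · intro j hjm hjn hsurv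
        rcases Nat.eq_or_lt_of_le hjm with h | h
        · simp [← h]
        · exfalso
          have hjG : j ∈ G.1 := hc j (by omega) hjn
            (fun k hk1 hk2 => hsurv k (by omega) hk2)
          have ha1 := hall j (by omega) hjn
          have ha2 := hsurv m (le_refl m) h
          omega
      · intro j hjm hjn
        rcases Nat.eq_or_lt_of_le hjm with h | h
        · rw [← h] at hjn ⊢
          show G.2.getD m 0 = pvScanR nums (nums.getD m 0) (m + 1)
          rw [hf m (by omega), ← hv]
          exact hn.symm
        · exact he j (by omega) hjn
      · intro j hj
        exact hf j (by omega)
    · -- next smaller element r0 exists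
      have hr0G : r0 ∈ G.1 := by
        apply hc r0 h1 h2
        intro k hk1 hk2
        have := h5 k hk1 hk2
        omega
      rcases pv_filter_head_asc (fun j => decide (nums.getD j 0 < v)) G.1 hidxpw r0 hr0G
          (decide_eq_true h4)
          (by intro j hj hpj
              rw [decide_eq_true_eq] at hpj
              by_contra hgt
              have := h5 j (hbm j hj).1 (by omega)
              omega) with ⟨t, hfilter⟩
      have hpop' : pvPop nums v G.1 = r0 :: t := by rw [hpop, hfilter]
      have hstep : pvStep nums G m = (m :: r0 :: t, G.2.set m (r0 : Int)) := by
        unfold pvStep; rw [hpop']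
      rw [hsplit, hstep]
      have hsub : ∀ x ∈ r0 :: t, x ∈ G.1 ∧ nums.getD x 0 < v := by
        intro x hx
        rw [← hfilter] at hx
        rcases List.mem_filter.mp hx with ⟨hx1, hx2⟩
        exact ⟨hx1, of_decide_eq_true hx2⟩
      refine ⟨?_, ?_, ?_, by simp [hd], ?_, ?_⟩
      · apply List.pairwise_cons.mpr
        constructor
        · intro b hb
          rcases hsub b hb with ⟨hb1, hb2⟩
          exact ⟨by have := (hbm b hb1).1; omega, hb2⟩
        · rw [← hfilter]; exact ha.filter _
      · intro j hj
        rcases List.mem_cons.mp hj with h | h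
        · subst h; exact ⟨le_refl j, by omega, by omega⟩
        · rcases hsub j h with ⟨hj1, hj2⟩
          rcases hbm j hj1 with ⟨hj3, hj4, hj5⟩
          refine ⟨by omega, hj4, ?_⟩
          intro k hk1 hk2
          rcases Nat.eq_or_lt_of_le hk1 with hk | hk
          · rw [← hk]; exact hj2
          · exact hj5 k hk hk2
      · intro j hjm hjn hsurv
        rcases Nat.eq_or_lt_of_le hjm with h | h
        · simp [← h]
        · apply List.mem_cons_of_mem
          have hjG : j ∈ G.1 := hc j (by omega) hjn
            (fun k hk1 hk2 => hsurv k (by omega) hk2)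
          rw [← hfilter]
          exact List.mem_filter.mpr ⟨hjG, decide_eq_true (hsurv m (le_refl m) h)⟩
      · intro j hjm hjn
        rcases Nat.eq_or_lt_of_le hjm with h | h
        · rw [← h] at hjn ⊢
          show (G.2.set m (r0 : Int)).getD m 0 = pvScanR nums (nums.getD m 0) (m + 1)
          rw [pv_getD_set_self _ _ _ (by omega : m < G.2.length), ← hv, h3]
        · rw [pv_getD_set_ne _ _ _ _ (by omega)]
          exact he j (by omega) hjn
      · intro j hj
        rw [pv_getD_set_ne _ _ _ _ (by omega)]
        exact hf j (by omega)

-- maximum of freq[k], freq[k+1], ..., freq[k+c]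
def pvSfx (freq : List Int) (k : Nat) : Nat → Int
  | 0 => freq.getD k 0
  | c + 1 => max (freq.getD k 0) (pvSfx freq (k + 1) c)

theorem pvSfx_snoc (freq : List Int) : ∀ c k,
    pvSfx freq k (c + 1) = max (pvSfx freq k c) (freq.getD (k + c + 1) 0) := by
  intro c
  induction c with
  | zero => intro k; simp [pvSfx]
  | succ c ih =>
    intro k
    show max (freq.getD k 0) (pvSfx freq (k + 1) (c + 1)) = _
    rw [ih (k + 1), ← max_assoc]
    have : k + 1 + c + 1 = k + (c + 1) + 1 := by omega
    rw [this]
    rfl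

theorem pvSfx_set (freq : List Int) (x : Int) : ∀ c k, k + c < freq.length →
    pvSfx (freq.set (k + c) (max (freq.getD (k + c) 0) x)) k c = max (pvSfx freq k c) x := by
  intro c
  induction c with
  | zero =>
    intro k hk
    show (freq.set (k + 0) _).getD (k + 0) 0 = _
    rw [pv_getD_set_self _ _ _ (by simpa using hk)]
    rfl
  | succ c ih =>
    intro k hk
    show max ((freq.set (k + (c+1)) _).getD k 0) (pvSfx _ (k + 1) c) = _
    have h1 : (k + 1) + c = k + (c + 1) := by omega
    have h2 : pvSfx (freq.set (k + (c+1)) (max (freq.getD (k + (c+1)) 0) x)) (k + 1) c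
        = max (pvSfx freq (k + 1) c) x := by
      rw [← h1] at *
      exact ih (k + 1) (by omega)
    rw [h2, pv_getD_set_ne _ _ _ _ (by omega), ← max_assoc]
    rfl

theorem pvSfx_nonneg (freq : List Int) (h : ∀ j, 0 ≤ freq.getD j 0) :
    ∀ c k, 0 ≤ pvSfx freq k c := by
  intro c
  induction c with
  | zero => intro k; exact h k
  | succ c ih => intro k; exact le_max_of_le_right (ih (k + 1))

-- A's downward propagation pass computes suffix maxima of freq
theorem pv_propagate (m : Nat) : ∀ (freq : List Int), m + 1 ≤ freq.length →
    (((List.range' 1 m).reverse).foldl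
        (fun fr i => fr.set i (max (fr.getD i 0) (fr.getD (i + 1) 0))) freq).length
      = freq.length ∧
    ∀ k, (((List.range' 1 m).reverse).foldl
        (fun fr i => fr.set i (max (fr.getD i 0) (fr.getD (i + 1) 0))) freq).getD k 0
      = if 1 ≤ k ∧ k ≤ m then pvSfx freq k (m + 1 - k) else freq.getD k 0 := by
  induction m with
  | zero =>
    intro freq _
    refine ⟨rfl, ?_⟩
    intro k
    simp only [List.range', List.reverse_nil, List.foldl_nil]
    have : ¬ (1 ≤ k ∧ k ≤ 0) := by omega
    rw [if_neg this]
  | succ m ih =>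
    intro freq hlen
    have hsplit : (List.range' 1 (m + 1)).reverse
        = (1 + m) :: (List.range' 1 m).reverse := by
      rw [List.range'_concat, List.reverse_append]; simp
    rw [hsplit, List.foldl_cons]
    have he : 1 + m = m + 1 := by omega
    rw [he]
    set freq1 := freq.set (m + 1) (max (freq.getD (m + 1) 0) (freq.getD (m + 1 + 1) 0)) with hfreq1
    have hlen1 : freq1.length = freq.length := by simp [hfreq1]
    rcases ih freq1 (by omega) with ⟨ihl, ihk⟩
    refine ⟨by rw [ihl, hlen1], ?_⟩
    intro k
    rw [ihk k]
    by_cases hk1 : 1 ≤ k ∧ k ≤ m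
    · rw [if_pos hk1, if_pos (by omega : 1 ≤ k ∧ k ≤ m + 1)]
      have hc : k + (m + 1 - k) = m + 1 := by omega
      have hx : pvSfx freq1 k (m + 1 - k) = max (pvSfx freq k (m + 1 - k)) (freq.getD (m + 2) 0) := by
        rw [hfreq1]
        have := pvSfx_set freq (freq.getD (m + 2) 0) (m + 1 - k) k (by omega)
        rw [hc] at this
        have he2 : m + 1 + 1 = m + 2 := by omega
        rw [he2]
        exact this
      rw [hx]
      have h3 : m + 1 + 1 - k = (m + 1 - k) + 1 := by omega
      rw [h3, pvSfx_snoc]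
      have h4 : k + (m + 1 - k) + 1 = m + 2 := by omega
      rw [h4]
    · by_cases hk2 : k = m + 1
      · rw [if_neg hk1, if_pos (by omega), hk2]
        have : m + 1 + 1 - (m + 1) = 1 := by omega
        rw [this, hfreq1, pv_getD_set_self _ _ _ (by omega)]
        show _ = max (freq.getD (m+1) 0) (pvSfx freq (m + 1 + 1) 0)
        rfl
      · rw [if_neg hk1, if_neg (by omega), hfreq1, pv_getD_set_ne _ _ _ _ (by omega)]

-- B's back-to-front collection, as two recursive functions
def pvRun (best : List Int) (run : Int) : Nat → Int
  | 0 => run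
  | L + 1 => pvRun best (max run (best.getD (L + 1) 0)) L

def pvOutSeq (best : List Int) (run : Int) : Nat → List Int
  | 0 => []
  | L + 1 => (max run (best.getD (L + 1) 0)) :: pvOutSeq best (max run (best.getD (L + 1) 0)) L

theorem pv_outFold (best : List Int) : ∀ L (acc : List Int) (run : Int),
    ((List.range' 1 L).reverse).foldl (fun (st : List Int × Int) L =>
        let run := if st.2 < best.getD L 0 then best.getD L 0 else st.2
        (st.1 ++ [run], run)) (acc, run)
      = (acc ++ pvOutSeq best run L, pvRun best run L) := by
  intro L
  induction L with
  | zero => intro acc run; simp [pvOutSeq, pvRun]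
  | succ L ih =>
    intro acc run
    have hsplit : (List.range' 1 (L + 1)).reverse
        = (1 + L) :: (List.range' 1 L).reverse := by
      rw [List.range'_concat, List.reverse_append]; simp
    rw [hsplit, List.foldl_cons]
    have he : 1 + L = L + 1 := by omega
    rw [he]
    have hmax : (if run < best.getD (L + 1) 0 then best.getD (L + 1) 0 else run)
        = max run (best.getD (L + 1) 0) := by
      rcases lt_or_ge run (best.getD (L + 1) 0) with h | h
      · rw [if_pos h, max_eq_right h.le]
      · rw [if_neg (by omega), max_eq_left h]
    show ((List.range' 1 L).reverse).foldl _
        (acc ++ [if run < best.getD (L + 1) 0 then best.getD (L + 1) 0 else run],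
         if run < best.getD (L + 1) 0 then best.getD (L + 1) 0 else run) = _
    rw [hmax, ih]
    show (acc ++ [max run (best.getD (L + 1) 0)] ++ pvOutSeq best (max run (best.getD (L + 1) 0)) L, _) = _
    rw [List.append_assoc, List.singleton_append]
    rfl

theorem pv_outSeq_map (best : List Int) : ∀ L (run : Int),
    pvOutSeq best run L
      = ((List.range' 1 L).reverse).map (fun k => max run (pvSfx best k (L - k))) := by
  intro L
  induction L with
  | zero => intro run; simp [pvOutSeq]
  | succ L ih =>
    intro run
    have hsplit : (List.range' 1 (L + 1)).reverse
        = (1 + L) :: (List.range' 1 L).reverse := by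
      rw [List.range'_concat, List.reverse_append]; simp
    rw [hsplit, List.map_cons]
    have he : 1 + L = L + 1 := by omega
    rw [he]
    show (max run (best.getD (L + 1) 0)) :: pvOutSeq best (max run (best.getD (L + 1) 0)) L = _
    have hhead : max run (best.getD (L + 1) 0)
        = max run (pvSfx best (L + 1) (L + 1 - (L + 1))) := by
      have : L + 1 - (L + 1) = 0 := by omega
      rw [this]; rfl
    rw [ih]
    apply List.cons_eq_cons.mpr
    refine ⟨hhead, ?_⟩
    apply List.map_congr_left
    intro k hk
    have hk' : 1 ≤ k ∧ k < 1 + L := by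
      have := List.mem_range'_1.mp (List.mem_reverse.mp hk)
      omega
    have hs : pvSfx best k (L - k + 1) = max (pvSfx best k (L - k)) (best.getD (k + (L - k) + 1) 0) :=
      pvSfx_snoc best (L - k) k
    have h1 : k + (L - k) + 1 = L + 1 := by omega
    have h2 : L - k + 1 = L + 1 - k := by omega
    rw [h1, h2] at hs
    rw [hs, max_assoc, max_comm (best.getD (L + 1) 0) (pvSfx best k (L - k))]

-- the fold building `best` preserves list length
theorem pv_fold_length (nums : List Int) : ∀ (l : List Nat) (freq : List Int),
    (l.foldl (fun best i =>
        let v := nums.getD i 0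
        let len := (pvScanR nums v (i + 1) - pvScanL nums v i - 1).toNat
        if best.getD len 0 < v then best.set len v else best) freq).length = freq.length := by
  intro l
  induction l with
  | nil => intro freq; rfl
  | cons i t ih =>
    intro freq
    rw [List.foldl_cons, ih]
    show (if freq.getD (pvScanR nums (nums.getD i 0) (i + 1) - pvScanL nums (nums.getD i 0) i - 1).toNat 0 < nums.getD i 0
        then freq.set (pvScanR nums (nums.getD i 0) (i + 1) - pvScanL nums (nums.getD i 0) i - 1).toNat (nums.getD i 0)
        else freq).length = freq.length
    split
    · exact List.length_set
    · rfl

-- the fold building `best` keeps all entries nonnegative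
theorem pv_fold_nonneg (nums : List Int) : ∀ (l : List Nat) (freq : List Int),
    (∀ j, 0 ≤ freq.getD j 0) → ∀ j,
    0 ≤ (l.foldl (fun best i =>
        let v := nums.getD i 0
        let len := (pvScanR nums v (i + 1) - pvScanL nums v i - 1).toNat
        if best.getD len 0 < v then best.set len v else best) freq).getD j 0 := by
  intro l
  induction l with
  | nil => intro freq h j; exact h j
  | cons i t ih =>
    intro freq h j
    rw [List.foldl_cons]
    apply ih
    intro j'
    set len := (pvScanR nums (nums.getD i 0) (i + 1) - pvScanL nums (nums.getD i 0) i - 1).toNat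
    by_cases hlt : freq.getD len 0 < nums.getD i 0
    · rw [if_pos hlt]
      by_cases hj : len = j'
      · subst hj
        by_cases hl : len < freq.length
        · rw [pv_getD_set_self _ _ _ hl]
          have := h len
          omega
        · rw [List.set_eq_of_length_le (by omega)]
          exact h len
      · rw [pv_getD_set_ne _ _ _ _ hj]
        exact h j'
    · rw [if_neg hlt]
      exact h j'

-- setting an index to its own value is a no-op
theorem pv_set_getD_self (l : List Int) (i : Nat) : l.set i (l.getD i 0) = l := by
  by_cases h : i < l.length
  · have hv : l.getD i 0 = l[i] := by simp [List.getD, List.getElem?_eq_getElem h]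
    rw [hv]
    exact List.set_getElem_self h
  · exact List.set_eq_of_length_le (by omega)

theorem findMaximums_spec' : ∀ (nums : List Int), findMaximums nums = findMaximums_alt nums := by
  intro nums
  rcases Nat.eq_zero_or_pos nums.length with hn | hn
  · rw [List.length_eq_zero_iff.mp hn]; rfl
  simp only [findMaximums, findMaximums_alt]
  rcases pv_leftPass nums nums.length nums.length (le_refl _) with ⟨_, _, _, _, hLe, _⟩
  have hRfold : (List.range nums.length).reverse = (List.range' 0 nums.length).reverse := by
    rw [List.range_eq_range']
  rw [hRfold]
  rcases pv_rightPass nums nums.length 0 (by omega) with ⟨_, _, _, _, hRe, _⟩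
  set Lf := (List.range nums.length).foldl (pvStep nums) ([], List.replicate nums.length (-1)) with hLdef
  set Rf := ((List.range' 0 nums.length).reverse).foldl (pvStep nums)
      ([], List.replicate nums.length ((nums.length : Int))) with hRdef
  -- the two `freq`/`best` folds agree
  have hfold : (List.range nums.length).foldl (fun freq i =>
        let len := ((Rf.2.getD i 0) - (Lf.2.getD i 0) - 1).toNat
        freq.set len (max (freq.getD len 0) (nums.getD i 0))) (List.replicate (nums.length + 1) 0)
      = (List.range nums.length).foldl (fun best i =>
        let v := nums.getD i 0
        let len := (pvScanR nums v (i + 1) - pvScanL nums v i - 1).toNat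
        if best.getD len 0 < v then best.set len v else best) (List.replicate (nums.length + 1) 0) := by
    apply PySem.List.foldl_congr_mem
    intro acc i hi
    have hiN : i < nums.length := List.mem_range.mp hi
    show (fun len => acc.set len (max (acc.getD len 0) (nums.getD i 0)))
        (((Rf.2.getD i 0) - (Lf.2.getD i 0) - 1).toNat) = _
    rw [hLe i hiN, hRe i (by omega) hiN]
    show acc.set _ (max (acc.getD _ 0) (nums.getD i 0)) = _
    set len := (pvScanR nums (nums.getD i 0) (i + 1) - pvScanL nums (nums.getD i 0) i - 1).toNat with hlendef
    by_cases h : acc.getD len 0 < nums.getD i 0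
    · rw [if_pos h, max_eq_right h.le]
    · rw [if_neg h, max_eq_left (not_lt.mp h), pv_set_getD_self]
  rw [hfold]
  set q := (List.range nums.length).foldl (fun best i =>
      let v := nums.getD i 0
      let len := (pvScanR nums v (i + 1) - pvScanL nums v i - 1).toNat
      if best.getD len 0 < v then best.set len v else best) (List.replicate (nums.length + 1) 0) with hqdef
  have hqlen : q.length = nums.length + 1 := by
    rw [hqdef, pv_fold_length]
    simp
  have hnn : ∀ j, 0 ≤ q.getD j 0 := by
    rw [hqdef]
    apply pv_fold_nonneg
    intro j
    by_cases hj : j < nums.length + 1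
    · rw [List.getD_replicate _ hj]
    · simp [List.getD, List.getElem?_eq_none (by simp; omega : (List.replicate (nums.length + 1) (0:Int)).length ≤ j)]
  -- B's back-to-front collection
  rw [pv_outFold q nums.length [] 0]
  show _ = (([] : List Int) ++ pvOutSeq q 0 nums.length).reverse
  rw [List.nil_append, pv_outSeq_map, List.map_reverse, List.reverse_reverse]
  rcases pv_propagate (nums.length - 1) q (by omega) with ⟨_, hpk⟩
  conv_rhs => rw [List.range'_eq_map_range, List.map_map]
  apply List.map_congr_left
  intro i hi
  have hiN : i < nums.length := List.mem_range.mp hi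
  show (List.foldl (fun freq i => freq.set i (max (freq.getD i 0) (freq.getD (i + 1) 0))) q
      (List.range' 1 (nums.length - 1)).reverse).getD (i + 1) 0
      = max 0 (pvSfx q (1 + i) (nums.length - (1 + i)))
  rw [hpk (i + 1)]
  have h1i : 1 + i = i + 1 := by omega
  rw [h1i]
  by_cases hc : i + 1 ≤ nums.length - 1
  · rw [if_pos ⟨by omega, hc⟩, max_eq_right (pvSfx_nonneg q hnn _ _)]
    have hd : nums.length - 1 + 1 - (i + 1) = nums.length - (i + 1) := by omega
    rw [hd]
  · have hieq : i + 1 = nums.length := by omega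
    rw [if_neg (by omega), max_eq_right (pvSfx_nonneg q hnn _ _), hieq]
    have hd : nums.length - nums.length = 0 := by omega
    rw [hd]
    rfl

-- ===== VERDICT (by name: the statement is the Claim_ definition above) =====
theorem findMaximums_spec : Claim_equal_findMaximums := by
  intro nums _
  unfold Spec_findMaximums
  exact findMaximums_spec' nums
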